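-- pv_equiv track=rewrite | github.com/Oaklight/nps-ctl | src/nps_ctl/cli/cmd_npc.py | _parse_npc_status_output
-- ===== SOURCE A (Python) =====
-- def _parse_npc_status_output(
--     stdout: str,
-- ) -> tuple[str, str]:
--     """Parse NPC status check output into status and details.
--
--     Extracts version and service status from the SSH command output
--     produced by ``check_npc_status``.
--
--     Args:
--         stdout: Raw stdout from the SSH status check command.
--
--     Returns:
--         A tuple of (status, details) where *status* is a rich-markup
--         string like ``[green]Running[/green]`` and *details* contains
--         extra information such as the NPC version.
--     """
--     lines = stdout.strip().splitlines()
--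
--     version = ""
--     service_status = ""
--
--     section = ""
--     for line in lines:
--         stripped = line.strip()
--         if stripped == "=== NPC Version ===":
--             section = "version"
--             continue
--         elif stripped == "=== Service Status ===":
--             section = "service"
--             continue
--
--         if section == "version" and stripped:
--             if "not installed" in stripped.lower():
--                 version = "Not installed"
--             else:
--                 version = stripped
--         elif section == "service" and stripped:
--             if not service_status:
--                 service_status = stripped
--
--     # Determine rich-formatted status string
--     if not version or version == "Not installed":
--         status = "[red]Not Installed[/red]"
--     elif "running" in service_status.lower():
--         status = "[green]Running[/green]"
--     elif "stopped" in service_status.lower() or "not running" in service_status.lower():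
--         status = "[yellow]Stopped[/yellow]"
--     else:
--         status = f"[yellow]{service_status or 'Unknown'}[/yellow]"
--
--     # Build details string
--     details_parts: list[str] = []
--     if version and version != "Not installed":
--         details_parts.append(version)
--     if service_status and "running" not in service_status.lower():
--         details_parts.append(service_status)
--
--     return status, ", ".join(details_parts)
-- ===== SOURCE B (Python) =====
-- def _parse_npc_status_output(stdout):
--     # B: instead of a running section-state machine, split the stripped line
--     # list into (header, body) sections by cutting at header positions, then
--     # flatten the bodies per section and read off last/first non-empty entry.
--     HDR = {"=== NPC Version ===": "version", "=== Service Status ===": "service"}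
--
--     def sections(lines):
--         if not lines:
--             return []
--         head, rest = lines[0], lines[1:]
--         if head not in HDR:
--             return sections(rest)
--         k = 0
--         while k < len(rest) and rest[k] not in HDR:
--             k += 1
--         return [(HDR[head], rest[:k])] + sections(rest[k:])
--
--     lines = [l.strip() for l in stdout.strip().splitlines()]
--     secs = sections(lines)
--     vlines = [x for name, body in secs if name == "version" for x in body if x]
--     slines = [x for name, body in secs if name == "service" for x in body if x]
--
--     version = vlines[-1] if vlines else ""
--     if version and "not installed" in version.lower():
--         version = "Not installed"
--     service_status = slines[0] if slines else ""
--
--     if not version or version == "Not installed":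
--         status = "[red]Not Installed[/red]"
--     elif "running" in service_status.lower():
--         status = "[green]Running[/green]"
--     elif "stopped" in service_status.lower() or "not running" in service_status.lower():
--         status = "[yellow]Stopped[/yellow]"
--     else:
--         status = f"[yellow]{service_status or 'Unknown'}[/yellow]"
--
--     details_parts = []
--     if version and version != "Not installed":
--         details_parts.append(version)
--     if service_status and "running" not in service_status.lower():
--         details_parts.append(service_status)
--     return status, ", ".join(details_parts)
-- ===== Notes on version B (the rewrite author's own statement) =====
-- stated objective: alternative
-- what changed: B drops A's running section-state machine: it cuts the stripped line list into (header, body) sections by recursively splitting at header positions, flattens the per-section bodies in a second stage, and reads version/service off as the last/first non-empty group entry.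
import Mathlib
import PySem

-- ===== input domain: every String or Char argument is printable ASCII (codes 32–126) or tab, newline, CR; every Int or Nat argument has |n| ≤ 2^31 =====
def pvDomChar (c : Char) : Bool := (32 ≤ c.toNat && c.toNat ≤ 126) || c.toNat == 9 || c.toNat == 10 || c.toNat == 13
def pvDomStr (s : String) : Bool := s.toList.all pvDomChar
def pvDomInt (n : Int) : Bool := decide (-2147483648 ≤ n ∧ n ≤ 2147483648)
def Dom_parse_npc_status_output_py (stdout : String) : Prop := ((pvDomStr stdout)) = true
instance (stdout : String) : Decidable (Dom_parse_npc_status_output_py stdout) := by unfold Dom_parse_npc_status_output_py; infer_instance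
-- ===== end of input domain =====

-- B replaces A's running section-state machine by a staged decomposition: cut the
-- stripped lines into (header, body) sections, then read last/first non-empty
-- entries off the flattened groups (alternative decomposition, same cost).

-- ===== PORT A =====
-- loop body of A: state is (version, service_status, section)
def pvStepA (acc : String × String × String) (line : String) : String × String × String :=
  let stripped := PySem.Str.strip line
  if stripped == "=== NPC Version ===" then (acc.1, acc.2.1, "version")
  else if stripped == "=== Service Status ===" then (acc.1, acc.2.1, "service")
  else if acc.2.2 == "version" && stripped != "" then
    (if PySem.Str.isIn "not installed" (PySem.Str.lower stripped) then "Not installed" else stripped,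
     acc.2.1, acc.2.2)
  else if acc.2.2 == "service" && stripped != "" then
    (acc.1, if acc.2.1 == "" then stripped else acc.2.1, acc.2.2)
  else acc

def parse_npc_status_output_py (stdout : String) : String × String :=
  let lines := PySem.Str.splitlines (PySem.Str.strip stdout)
  let r := lines.foldl pvStepA ("", "", "")
  let version := r.1
  let service_status := r.2.1
  let status :=
    if version == "" || version == "Not installed" then "[red]Not Installed[/red]"
    else if PySem.Str.isIn "running" (PySem.Str.lower service_status) then "[green]Running[/green]"
    else if PySem.Str.isIn "stopped" (PySem.Str.lower service_status)
            || PySem.Str.isIn "not running" (PySem.Str.lower service_status) then "[yellow]Stopped[/yellow]"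
    else "[yellow]" ++ (if service_status == "" then "Unknown" else service_status) ++ "[/yellow]"
  let details_parts : List String := []
  let details_parts := if version != "" && version != "Not installed" then details_parts ++ [version] else details_parts
  let details_parts := if service_status != "" && !(PySem.Str.isIn "running" (PySem.Str.lower service_status))
                       then details_parts ++ [service_status] else details_parts
  (status, PySem.Str.join ", " details_parts)

-- ===== PORT B =====
-- 'line in HDR' / 'HDR[line]' of Source B (two-entry literal dict): direct lookup
def pvHdr? (s : String) : Option String :=
  if s == "=== NPC Version ===" then some "version"
  else if s == "=== Service Status ===" then some "service"
  else none

-- Source B's recursive 'sections'; its while loop computes the split index k of the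
-- first header in rest, so rest[:k]/rest[k:] port exactly as takeWhile/dropWhile
def pvSections : List String → List (String × List String)
  | [] => []
  | head :: rest =>
    match pvHdr? head with
    | none => pvSections rest
    | some name =>
        (name, rest.takeWhile (fun l => (pvHdr? l).isNone)) ::
          pvSections (rest.dropWhile (fun l => (pvHdr? l).isNone))
termination_by ls => ls.length
decreasing_by
  · simp
  · exact Nat.lt_succ_of_le (List.length_dropWhile_le _ _)

def parse_npc_status_output_py_alt (stdout : String) : String × String :=
  let lines := (PySem.Str.splitlines (PySem.Str.strip stdout)).map PySem.Str.strip
  let secs := pvSections lines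
  let vlines := (secs.filter (fun p => p.1 == "version")).flatMap (fun p => p.2.filter (fun x => x != ""))
  let slines := (secs.filter (fun p => p.1 == "service")).flatMap (fun p => p.2.filter (fun x => x != ""))
  let raw := (PySem.List.pyGet? vlines (-1)).getD ""   -- vlines[-1] if vlines else ""
  let version := if raw != "" && PySem.Str.isIn "not installed" (PySem.Str.lower raw) then "Not installed" else raw
  let service_status := (PySem.List.pyGet? slines 0).getD ""   -- slines[0] if slines else ""
  let status :=
    if version == "" || version == "Not installed" then "[red]Not Installed[/red]"
    else if PySem.Str.isIn "running" (PySem.Str.lower service_status) then "[green]Running[/green]"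
    else if PySem.Str.isIn "stopped" (PySem.Str.lower service_status)
            || PySem.Str.isIn "not running" (PySem.Str.lower service_status) then "[yellow]Stopped[/yellow]"
    else "[yellow]" ++ (if service_status == "" then "Unknown" else service_status) ++ "[/yellow]"
  let details_parts : List String := []
  let details_parts := if version != "" && version != "Not installed" then details_parts ++ [version] else details_parts
  let details_parts := if service_status != "" && !(PySem.Str.isIn "running" (PySem.Str.lower service_status))
                       then details_parts ++ [service_status] else details_parts
  (status, PySem.Str.join ", " details_parts)

-- ===== PRECONDITION & SPEC =====
def Spec_parse_npc_status_output_py (stdout : String) (out : String × String) : Prop := out = parse_npc_status_output_py_alt stdout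
instance (stdout : String) (out : String × String) : Decidable (Spec_parse_npc_status_output_py stdout out) := by unfold Spec_parse_npc_status_output_py; infer_instance

-- ===== CLAIM (what is proved, stated in full; the proofs are below) =====
def Claim_equal_parse_npc_status_output_py : Prop := ∀ (stdout : String), Dom_parse_npc_status_output_py stdout → Spec_parse_npc_status_output_py stdout (parse_npc_status_output_py stdout)

-- ===== LEMMAS AND PROOFS =====

-- A's step on an already-stripped line
def pvStepA' (acc : String × String × String) (stripped : String) : String × String × String :=
  if stripped == "=== NPC Version ===" then (acc.1, acc.2.1, "version")
  else if stripped == "=== Service Status ===" then (acc.1, acc.2.1, "service")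
  else if acc.2.2 == "version" && stripped != "" then
    (if PySem.Str.isIn "not installed" (PySem.Str.lower stripped) then "Not installed" else stripped,
     acc.2.1, acc.2.2)
  else if acc.2.2 == "service" && stripped != "" then
    (acc.1, if acc.2.1 == "" then stripped else acc.2.1, acc.2.2)
  else acc

def pvNorm (x : String) : String :=
  if PySem.Str.isIn "not installed" (PySem.Str.lower x) then "Not installed" else x

-- A's version/service scalars after folding a header-free body in the given section
def pvVfold (v : String) (ls : List String) : String :=
  (ls.filter (fun x => x != "")).foldl (fun _ x => pvNorm x) v

def pvSfold (s : String) (ls : List String) : String :=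
  (ls.filter (fun x => x != "")).foldl (fun a x => if a == "" then x else a) s

-- A's whole run, replayed over B's section decomposition
def pvRun (v s : String) : List (String × List String) → String × String
  | [] => (v, s)
  | (name, body) :: rest =>
      if name = "version" then pvRun (pvVfold v body) s rest
      else pvRun v (pvSfold s body) rest

lemma pv_body_version (ls : List String) (hn : ∀ x ∈ ls, pvHdr? x = none) (v s : String) :
    ls.foldl pvStepA' (v, s, "version") = (pvVfold v ls, s, "version") := by
  induction ls generalizing v with
  | nil => rfl
  | cons x rest ih =>
      have hx := hn x (by simp)
      have h1 : ¬ x = "=== NPC Version ===" := by intro h; simp [pvHdr?, h] at hx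
      have h2 : ¬ x = "=== Service Status ===" := by intro h; simp [pvHdr?, h] at hx
      have hrest : ∀ y ∈ rest, pvHdr? y = none := fun y hy => hn y (by simp [hy])
      by_cases he : x = ""
      · subst he
        simp only [List.foldl_cons, pvStepA']
        norm_num
        simpa [pvVfold] using ih hrest v
      · simp only [List.foldl_cons, pvStepA']
        rw [if_neg (by simp [h1]), if_neg (by simp [h2]), if_pos (by simp [he]), ih hrest]
        simp [pvVfold, pvNorm, he]

lemma pv_body_service (ls : List String) (hn : ∀ x ∈ ls, pvHdr? x = none) (v s : String) :
    ls.foldl pvStepA' (v, s, "service") = (v, pvSfold s ls, "service") := by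
  induction ls generalizing s with
  | nil => rfl
  | cons x rest ih =>
      have hx := hn x (by simp)
      have h1 : ¬ x = "=== NPC Version ===" := by intro h; simp [pvHdr?, h] at hx
      have h2 : ¬ x = "=== Service Status ===" := by intro h; simp [pvHdr?, h] at hx
      have hrest : ∀ y ∈ rest, pvHdr? y = none := fun y hy => hn y (by simp [hy])
      by_cases he : x = ""
      · subst he
        simp only [List.foldl_cons, pvStepA']
        norm_num
        simpa [pvSfold] using ih hrest s
      · simp only [List.foldl_cons, pvStepA']
        rw [if_neg (by simp [h1]), if_neg (by simp [h2]), if_neg (by simp), if_pos (by simp [he]), ih hrest]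
        simp [pvSfold, he]

-- the first step on a header line ignores the current section
lemma pv_step_header (v s sec name h : String) (hh : pvHdr? h = some name) :
    pvStepA' (v, s, sec) h = (v, s, name) := by
  by_cases h1 : h = "=== NPC Version ==="
  · simp [pvHdr?, h1] at hh; simp [pvStepA', h1, ← hh]
  · by_cases h2 : h = "=== Service Status ==="
    · simp [pvHdr?, h2] at hh; simp [pvStepA', h2, ← hh]
    · simp [pvHdr?, h1, h2] at hh

-- main: A's fold from the empty section equals pvRun over B's sections
lemma pv_main : ∀ n (ls : List String), ls.length ≤ n → ∀ v s,
    ((ls.foldl pvStepA' (v, s, "")).1, (ls.foldl pvStepA' (v, s, "")).2.1)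
      = pvRun v s (pvSections ls) := by
  intro n
  induction n with
  | zero =>
      intro ls hl v s
      rw [List.length_eq_zero_iff.mp (Nat.le_zero.mp hl)]
      simp [pvSections, pvRun]
  | succ n ih =>
      intro ls hl v s
      match ls with
      | [] => simp [pvSections, pvRun]
      | x :: rest =>
        have hlr : rest.length ≤ n := by simpa using hl
        cases hx : pvHdr? x with
        | none =>
            have h1 : ¬ x = "=== NPC Version ===" := by intro h; simp [pvHdr?, h] at hx
            have h2 : ¬ x = "=== Service Status ===" := by intro h; simp [pvHdr?, h] at hx
            have hstep : pvStepA' (v, s, "") x = (v, s, "") := by simp [pvStepA', h1, h2]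
            rw [List.foldl_cons, hstep, pvSections]
            simp only [hx]
            exact ih rest hlr v s
        | some name =>
            have hsplit := (List.takeWhile_append_dropWhile (p := fun l => (pvHdr? l).isNone) (l := rest)).symm
            set body := rest.takeWhile (fun l => (pvHdr? l).isNone) with hbody
            set tail := rest.dropWhile (fun l => (pvHdr? l).isNone) with htail
            have hbn : ∀ y ∈ body, pvHdr? y = none := by
              intro y hy
              have := List.mem_takeWhile_imp (hbody ▸ hy)
              simpa [Option.isNone_iff_eq_none] using this
            have htail_len : tail.length ≤ rest.length := htail ▸ List.length_dropWhile_le _ _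
            -- tail is [] or starts with a header; in both cases folding it from any
            -- section state has the same (version, service) projections as from ""
            have htl_eq : ∀ v' s' sec',
                ((tail.foldl pvStepA' (v', s', sec')).1, (tail.foldl pvStepA' (v', s', sec')).2.1)
                  = pvRun v' s' (pvSections tail) := by
              intro v' s' sec'
              cases ht : tail with
              | nil => simp [pvSections, pvRun]
              | cons h t =>
                  have ht' : rest.dropWhile (fun l => (pvHdr? l).isNone) = h :: t := by
                    rw [← htail]; exact ht
                  have hw : rest.dropWhile (fun l => (pvHdr? l).isNone) ≠ [] := by simp [ht']
                  have hhdr : ((pvHdr? h).isNone) = false := by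
                    have hfalse := List.head_dropWhile_not (fun l => (pvHdr? l).isNone) (w := hw)
                    have hh : (rest.dropWhile (fun l => (pvHdr? l).isNone)).head hw = h := by
                      simp [ht']
                    rw [hh] at hfalse
                    simpa using hfalse
                  obtain ⟨nm, hnm⟩ : ∃ nm, pvHdr? h = some nm := by
                    cases hh : pvHdr? h with
                    | none => simp [hh] at hhdr
                    | some nm => exact ⟨nm, rfl⟩
                  have hlen : (h :: t).length ≤ n := by rw [← ht]; omega
                  have h0 := ih (h :: t) hlen v' s'
                  rw [List.foldl_cons, pv_step_header _ _ _ _ _ hnm] at h0 ⊢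
                  exact h0
            have hname : name = "version" ∨ name = "service" := by
              by_cases h1 : x = "=== NPC Version ==="
              · left; simp [pvHdr?, h1] at hx; exact hx.symm
              · by_cases h2 : x = "=== Service Status ==="
                · right; simp [pvHdr?, h2] at hx; exact hx.symm
                · simp [pvHdr?, h1, h2] at hx
            have hfoldsplit : ∀ st : String × String × String,
                rest.foldl pvStepA' st = tail.foldl pvStepA' (body.foldl pvStepA' st) := by
              intro st
              conv_lhs => rw [hsplit]
              rw [List.foldl_append]
            rw [List.foldl_cons, pv_step_header _ _ _ _ _ hx, hfoldsplit, pvSections]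
            simp only [hx, ← hbody, ← htail]
            rcases hname with hname | hname
            · subst hname
              rw [pv_body_version body hbn v s]
              have : pvRun v s (("version", body) :: pvSections tail)
                  = pvRun (pvVfold v body) s (pvSections tail) := by simp [pvRun]
              rw [this]
              exact htl_eq _ _ _
            · subst hname
              rw [pv_body_service body hbn v s]
              have : pvRun v s (("service", body) :: pvSections tail)
                  = pvRun v (pvSfold s body) (pvSections tail) := by simp [pvRun]
              rw [this]
              exact htl_eq _ _ _

-- pvSections only produces the two section names
lemma pv_sections_names : ∀ n (ls : List String), ls.length ≤ n →
    ∀ p ∈ pvSections ls, p.1 = "version" ∨ p.1 = "service" := by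
  intro n
  induction n with
  | zero =>
      intro ls hl
      rw [List.length_eq_zero_iff.mp (Nat.le_zero.mp hl)]
      simp [pvSections]
  | succ n ih =>
      intro ls hl p hp
      match ls with
      | [] => simp [pvSections] at hp
      | x :: rest =>
        have hlr : rest.length ≤ n := by simpa using hl
        cases hx : pvHdr? x with
        | none =>
            rw [pvSections] at hp; simp only [hx] at hp
            exact ih rest hlr p hp
        | some name =>
            rw [pvSections] at hp; simp only [hx] at hp
            rcases List.mem_cons.mp hp with h | h
            · subst h
              by_cases h1 : x = "=== NPC Version ==="
              · left; simp [pvHdr?, h1] at hx; exact hx.symm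
              · by_cases h2 : x = "=== Service Status ==="
                · right; simp [pvHdr?, h2] at hx; exact hx.symm
                · simp [pvHdr?, h1, h2] at hx
            · have hlen : (rest.dropWhile (fun l => (pvHdr? l).isNone)).length ≤ n :=
                le_trans (List.length_dropWhile_le _ _) hlr
              exact ih _ hlen p h

def pvFlatV (secs : List (String × List String)) : List String :=
  (secs.filter (fun p => p.1 == "version")).flatMap (fun p => p.2)

def pvFlatS (secs : List (String × List String)) : List String :=
  (secs.filter (fun p => p.1 == "service")).flatMap (fun p => p.2)

lemma pv_vfold_append (v : String) (a b : List String) :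
    pvVfold (pvVfold v a) b = pvVfold v (a ++ b) := by
  simp [pvVfold, List.filter_append, List.foldl_append]

lemma pv_sfold_append (s : String) (a b : List String) :
    pvSfold (pvSfold s a) b = pvSfold s (a ++ b) := by
  simp [pvSfold, List.filter_append, List.foldl_append]

lemma pv_run_eq (secs : List (String × List String))
    (hn : ∀ p ∈ secs, p.1 = "version" ∨ p.1 = "service") :
    ∀ v s, pvRun v s secs = (pvVfold v (pvFlatV secs), pvSfold s (pvFlatS secs)) := by
  induction secs with
  | nil => intro v s; simp [pvRun, pvFlatV, pvFlatS, pvVfold, pvSfold]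
  | cons p rest ih =>
      intro v s
      obtain ⟨name, body⟩ := p
      have hrest : ∀ q ∈ rest, q.1 = "version" ∨ q.1 = "service" :=
        fun q hq => hn q (by simp [hq])
      rcases hn (name, body) (by simp) with h | h <;> simp only at h <;> subst h
      · show pvRun (pvVfold v body) s rest = _
        rw [ih hrest]
        simp [pvFlatV, pvFlatS, pv_vfold_append]
      · show pvRun v (pvSfold s body) rest = _
        rw [ih hrest]
        simp [pvFlatV, pvFlatS, pv_sfold_append]

-- fold that keeps only the last element
lemma pv_foldl_last {α β : Type} (g : α → β) (init : β) (l : List α) :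
    l.foldl (fun _ x => g x) init = (l.getLast?.map g).getD init := by
  induction l generalizing init with
  | nil => rfl
  | cons x rest ih =>
      rw [List.foldl_cons, ih]
      cases h : rest.getLast? with
      | none => rw [List.getLast?_eq_none_iff.mp h]; rfl
      | some y => simp [List.getLast?_cons, h]

-- fold that keeps the first non-default element, over a list without defaults
lemma pv_foldl_keep (a : String) (l : List String) (ha : a ≠ "") :
    l.foldl (fun a x => if a == "" then x else a) a = a := by
  induction l with
  | nil => rfl
  | cons x rest ih => simpa [ha] using ih

lemma pv_sfold_head (l : List String) (hl : ∀ x ∈ l, x ≠ "") :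
    pvSfold "" l = l.headD "" := by
  have hf : l.filter (fun x => x != "") = l :=
    List.filter_eq_self.mpr (by intro x hx; simpa using hl x hx)
  unfold pvSfold
  rw [hf]
  cases l with
  | nil => rfl
  | cons x rest =>
      have hx : x ≠ "" := hl x (by simp)
      simp only [List.foldl_cons, List.headD_cons]
      rw [show (if ("" : String) == "" then x else "") = x by simp]
      exact pv_foldl_keep x rest hx

-- B's vlines/slines are the filtered flattenings
lemma pv_flat_filter (q : String × List String → Bool) (secs : List (String × List String)) :
    (secs.filter q).flatMap (fun p => p.2.filter (fun x => x != ""))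
      = ((secs.filter q).flatMap (fun p => p.2)).filter (fun x => x != "") := by
  induction secs.filter q with
  | nil => rfl
  | cons p rest ih => simp [List.flatMap_cons, List.filter_append, ih]

-- shared final formatting of (version, service_status) — identical tail code of both ports
def pvFinish (version service_status : String) : String × String :=
  let status :=
    if version == "" || version == "Not installed" then "[red]Not Installed[/red]"
    else if PySem.Str.isIn "running" (PySem.Str.lower service_status) then "[green]Running[/green]"
    else if PySem.Str.isIn "stopped" (PySem.Str.lower service_status)
            || PySem.Str.isIn "not running" (PySem.Str.lower service_status) then "[yellow]Stopped[/yellow]"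
    else "[yellow]" ++ (if service_status == "" then "Unknown" else service_status) ++ "[/yellow]"
  let details_parts : List String := []
  let details_parts := if version != "" && version != "Not installed" then details_parts ++ [version] else details_parts
  let details_parts := if service_status != "" && !(PySem.Str.isIn "running" (PySem.Str.lower service_status))
                       then details_parts ++ [service_status] else details_parts
  (status, PySem.Str.join ", " details_parts)

-- B's group lists and version/service scalars, as functions of the stripped line list
def pvVlines (sl : List String) : List String :=
  ((pvSections sl).filter (fun p => p.1 == "version")).flatMap (fun p => p.2.filter (fun x => x != ""))

def pvSlines (sl : List String) : List String :=
  ((pvSections sl).filter (fun p => p.1 == "service")).flatMap (fun p => p.2.filter (fun x => x != ""))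

def pvVB (sl : List String) : String :=
  if (PySem.List.pyGet? (pvVlines sl) (-1)).getD "" != ""
      && PySem.Str.isIn "not installed" (PySem.Str.lower ((PySem.List.pyGet? (pvVlines sl) (-1)).getD ""))
  then "Not installed" else (PySem.List.pyGet? (pvVlines sl) (-1)).getD ""

def pvSB (sl : List String) : String := (PySem.List.pyGet? (pvSlines sl) 0).getD ""

lemma pv_versions (sl : List String) :
    ((sl.foldl pvStepA' ("", "", "")).1, (sl.foldl pvStepA' ("", "", "")).2.1)
      = (pvVB sl, pvSB sl) := by
  have hmain := pv_main sl.length sl le_rfl "" ""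
  have hnames := pv_sections_names sl.length sl le_rfl
  have hrun := pv_run_eq (pvSections sl) hnames "" ""
  have hvfilter : pvVlines sl = (pvFlatV (pvSections sl)).filter (fun x => x != "") := by
    unfold pvVlines; rw [pv_flat_filter]; rfl
  have hsfilter : pvSlines sl = (pvFlatS (pvSections sl)).filter (fun x => x != "") := by
    unfold pvSlines; rw [pv_flat_filter]; rfl
  have hvmem : ∀ x ∈ pvVlines sl, x ≠ "" := by
    intro x hx; rw [hvfilter] at hx
    simpa using (List.of_mem_filter hx)
  have hsmem : ∀ x ∈ pvSlines sl, x ≠ "" := by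
    intro x hx; rw [hsfilter] at hx
    simpa using (List.of_mem_filter hx)
  have hv : pvVfold "" (pvFlatV (pvSections sl)) = pvVB sl := by
    unfold pvVB
    rw [PySem.List.pyGet?_neg_one]
    unfold pvVfold
    rw [← hvfilter, pv_foldl_last]
    cases h : (pvVlines sl).getLast? with
    | none => simp
    | some y =>
        have hy : y ≠ "" := hvmem y (List.mem_of_getLast? h)
        simp [pvNorm, hy]
  have hs : pvSfold "" (pvFlatS (pvSections sl)) = pvSB sl := by
    unfold pvSB
    unfold pvSfold
    rw [← hsfilter]
    have h1 := pv_sfold_head (pvSlines sl) hsmem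
    unfold pvSfold at h1
    rw [List.filter_eq_self.mpr (by intro x hx; simpa using hsmem x hx)] at h1
    rw [h1, PySem.List.pyGet?_zero]
    have h2 : ∀ l : List String, l.headD "" = (l[0]?).getD "" := by
      intro l; cases l <;> simp
    exact h2 (pvSlines sl)
  rw [hmain, hrun, hv, hs]

-- ===== VERDICT (by name: the statement is the Claim_ definition above) =====
set_option maxHeartbeats 1000000 in
theorem parse_npc_status_output_py_spec : Claim_equal_parse_npc_status_output_py := by
  intro stdout _
  unfold Spec_parse_npc_status_output_py
  have hA : parse_npc_status_output_py stdout
      = pvFinish ((PySem.Str.splitlines (PySem.Str.strip stdout)).foldl pvStepA ("", "", "")).1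
                 ((PySem.Str.splitlines (PySem.Str.strip stdout)).foldl pvStepA ("", "", "")).2.1 := rfl
  have hB : parse_npc_status_output_py_alt stdout
      = pvFinish (pvVB ((PySem.Str.splitlines (PySem.Str.strip stdout)).map PySem.Str.strip))
                 (pvSB ((PySem.Str.splitlines (PySem.Str.strip stdout)).map PySem.Str.strip)) := rfl
  rw [hA, hB]
  have hfold : (PySem.Str.splitlines (PySem.Str.strip stdout)).foldl pvStepA ("", "", "")
      = ((PySem.Str.splitlines (PySem.Str.strip stdout)).map PySem.Str.strip).foldl pvStepA' ("", "", "") := by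
    rw [List.foldl_map]; rfl
  rw [hfold]
  obtain ⟨h1, h2⟩ := Prod.mk.inj (pv_versions ((PySem.Str.splitlines (PySem.Str.strip stdout)).map PySem.Str.strip))
  rw [h1, h2]
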